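-- pv_equiv track=rewrite | github.com/alangnt/codedex-dsa-challenge | 10-hitchhikers-guide.py | minimum_components
-- ===== SOURCE A (Python) =====
-- def minimum_components(components):
--   # Write code below 💖
--   # start with just the empty sum
--   found = {0: 0}  # sum -> fewest components to reach it
--   for val in components:
--     # copy so we don't modify while iterating
--     snapshot = dict(found)
--     for total, count in snapshot.items():
--       new_total = total + val
--       if new_total <= 42:
--         if new_total not in found or count + 1 < found[new_total]:
--           found[new_total] = count + 1
--   return found.get(42, -1)
-- ===== SOURCE B (Python) =====
-- def minimum_components(components):
--   # top-down memoized recursion over the item index; running sum capped at 42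
--   n = len(components)
--   memo = {}
--   def solve(i, s):
--     # fewest items from components[i:] making s reach exactly 42 (None = impossible)
--     if i == n:
--       return 0 if s == 42 else None
--     key = (i, s)
--     if key in memo:
--       return memo[key]
--     best = solve(i + 1, s)
--     if s + components[i] <= 42:
--       taken = solve(i + 1, s + components[i])
--       if taken is not None and (best is None or taken + 1 < best):
--         best = taken + 1
--     memo[key] = best
--     return best
--   r = solve(0, 0)
--   return -1 if r is None else r
-- ===== Notes on version B (the rewrite author's own statement) =====
-- stated objective: alternative
-- what changed: A's forward dynamic programming over a dict of reachable partial sums (snapshot-and-extend per item, keeping the fewest-components count per sum) is replaced by top-down memoized recursion over the item index: solve(i, s) takes the minimum of skipping item i and, when s+components[i] <= 42, taking it, with base case 0 when s == 42.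
import Mathlib
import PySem

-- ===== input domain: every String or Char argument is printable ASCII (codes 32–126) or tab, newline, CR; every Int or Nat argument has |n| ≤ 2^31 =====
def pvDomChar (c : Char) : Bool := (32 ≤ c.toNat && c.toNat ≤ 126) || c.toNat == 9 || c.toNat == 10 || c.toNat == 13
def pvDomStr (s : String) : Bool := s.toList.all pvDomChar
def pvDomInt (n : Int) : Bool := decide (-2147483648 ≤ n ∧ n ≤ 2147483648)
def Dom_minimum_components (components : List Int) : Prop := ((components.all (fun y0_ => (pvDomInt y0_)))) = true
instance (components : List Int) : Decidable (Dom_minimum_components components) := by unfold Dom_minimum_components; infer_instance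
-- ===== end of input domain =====

-- B replaces A's forward dict DP over partial sums by top-down memoized recursion over the item index (objective: alternative decomposition, not faster).

-- ===== PORT A =====
-- inner body of A's 'for total, count in snapshot.items()' loop
def pvInner (val : Int) (f : PySem.Dict Int Int) (tc : Int × Int) : PySem.Dict Int Int :=
  let newTotal := tc.1 + val
  if newTotal ≤ 42 then
    if f.contains newTotal = false ∨ tc.2 + 1 < f.getD newTotal 0 then
      f.insert newTotal (tc.2 + 1)
    else f
  else f

-- one iteration of A's outer 'for val in components' loop (snapshot = found at entry)
def pvStepA (found : PySem.Dict Int Int) (val : Int) : PySem.Dict Int Int :=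
  found.items.foldl (pvInner val) found

def minimum_components (components : List Int) : Int :=
  let found : PySem.Dict Int Int := PySem.Dict.ofList [(0, 0)]
  let found := components.foldl pvStepA found
  found.getD 42 (-1)

-- ===== PORT B =====
-- Source B's solve(i, s): the suffix components[i:] is the list argument (memoisation is pure caching, elided)
def pvSolve : List Int → Int → Option Int
  | [], s => if s = 42 then some 0 else none
  | v :: rest, s =>
    let best := pvSolve rest s
    if s + v ≤ 42 then
      match pvSolve rest (s + v), best with
      | some t, none => some (t + 1)
      | some t, some b => if t + 1 < b then some (t + 1) else some b
      | none, _ => best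
    else best

def minimum_components_alt (components : List Int) : Int :=
  match pvSolve components 0 with
  | none => -1
  | some r => r

-- ===== PRECONDITION & SPEC =====
def Spec_minimum_components (components : List Int) (out : Int) : Prop := out = minimum_components_alt components
instance (components : List Int) (out : Int) : Decidable (Spec_minimum_components components out) := by unfold Spec_minimum_components; infer_instance

-- ===== CLAIM (what is proved, stated in full; the proofs are below) =====
def Claim_equal_minimum_components : Prop := ∀ (components : List Int), Dom_minimum_components components → Spec_minimum_components components (minimum_components components)

-- ===== LEMMAS AND PROOFS =====

-- min on Option Int with none = +∞
def omin : Option Int → Option Int → Option Int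
  | none, b => b
  | some a, none => some a
  | some a, some b => some (min a b)

def lmin (l : List (Option Int)) : Option Int := l.foldl omin none

-- contribution of a dict entry (sum t, count c): c + fewest items of the rest reaching 42 from t
def pvTerm (r : List Int) (tc : Int × Int) : Option Int := (pvSolve r tc.1).map (tc.2 + ·)

def pvCombine (d : PySem.Dict Int Int) (r : List Int) : Option Int := lmin (d.items.map (pvTerm r))

-- contribution of one inner-loop iteration for item v
def pvContrib (v : Int) (r : List Int) (tc : Int × Int) : Option Int :=
  if tc.1 + v ≤ 42 then pvTerm r (tc.1 + v, tc.2 + 1) else none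

theorem omin_none_right (a : Option Int) : omin a none = a := by cases a <;> rfl

theorem omin_comm (a b : Option Int) : omin a b = omin b a := by
  cases a <;> cases b <;> simp [omin, min_comm]

theorem omin_assoc (a b c : Option Int) : omin (omin a b) c = omin a (omin b c) := by
  cases a <;> cases b <;> cases c <;> simp [omin, min_assoc]

theorem foldl_omin (l : List (Option Int)) (a : Option Int) : l.foldl omin a = omin a (lmin l) := by
  induction l generalizing a with
  | nil => simp [lmin, List.foldl, omin_none_right]
  | cons x l ih =>
    show (x :: l).foldl omin a = omin a (lmin (x :: l))
    have hx : lmin (x :: l) = omin x (lmin l) := by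
      show (x :: l).foldl omin none = _
      simp only [List.foldl_cons]
      rw [ih]
      rfl
    simp only [List.foldl_cons]
    rw [ih, hx, omin_assoc]

theorem lmin_cons (x : Option Int) (l : List (Option Int)) : lmin (x :: l) = omin x (lmin l) := by
  show (x :: l).foldl omin none = _
  simp only [List.foldl_cons]
  rw [foldl_omin]
  rfl

theorem lmin_append (l₁ l₂ : List (Option Int)) : lmin (l₁ ++ l₂) = omin (lmin l₁) (lmin l₂) := by
  induction l₁ with
  | nil => rfl
  | cons x l ih => rw [List.cons_append, lmin_cons, lmin_cons, ih, omin_assoc]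

theorem lmin_split {α : Type} (l : List α) (g h : α → Option Int) :
    lmin (l.map (fun x => omin (g x) (h x))) = omin (lmin (l.map g)) (lmin (l.map h)) := by
  induction l with
  | nil => rfl
  | cons x l ih =>
    simp only [List.map_cons]
    rw [lmin_cons, lmin_cons, lmin_cons, ih]
    rw [omin_assoc, omin_assoc]
    congr 1
    rw [← omin_assoc, ← omin_assoc, omin_comm (h x) (lmin (l.map g))]

theorem pvTerm_absorb (r : List Int) (k u w : Int) :
    omin (pvTerm r (k, u)) (pvTerm r (k, w)) = pvTerm r (k, min u w) := by
  unfold pvTerm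
  cases pvSolve r k with
  | none => rfl
  | some x =>
    simp only [Option.map_some, omin]
    congr 1
    omega

theorem pvSolve_cons (v : Int) (rest : List Int) (s : Int) :
    pvSolve (v :: rest) s =
      omin (pvSolve rest s) (if s + v ≤ 42 then (pvSolve rest (s + v)).map (· + 1) else none) := by
  show (let best := pvSolve rest s; _) = _
  by_cases hg : s + v ≤ 42
  · simp only [pvSolve, if_pos hg]
    cases ht : pvSolve rest (s + v) with
    | none => cases pvSolve rest s <;> simp [omin]
    | some t =>
      cases hb : pvSolve rest s with
      | none => simp [omin]
      | some b =>
        simp only [Option.map_some, omin]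
        split_ifs with h <;> simp <;> omega
  · simp [pvSolve, if_neg hg, omin_none_right]

-- absorbing an element already dominated by a member of the list
theorem lmin_absorb (l : List (Option Int)) (x o : Option Int) (hx : x ∈ l) (h : omin x o = x) :
    omin (lmin l) o = lmin l := by
  induction l with
  | nil => cases hx
  | cons a l ih =>
    rw [lmin_cons]
    rcases List.mem_cons.mp hx with rfl | hx'
    · rw [omin_comm x (lmin l), omin_assoc, h, omin_comm]
    · rw [omin_assoc, ih hx']

theorem lmin_eq_none (l : List (Option Int)) (h : ∀ x ∈ l, x = none) : lmin l = none := by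
  induction l with
  | nil => rfl
  | cons a l ih =>
    rw [lmin_cons, h a List.mem_cons_self, ih fun x hx => h x (List.mem_cons_of_mem a hx)]
    rfl

theorem pvTerm_cons (v : Int) (r : List Int) (tc : Int × Int) :
    pvTerm (v :: r) tc = omin (pvTerm r tc) (pvContrib v r tc) := by
  obtain ⟨t, c⟩ := tc
  simp only [pvContrib, pvTerm, pvSolve_cons]
  by_cases hg : t + v ≤ 42
  · simp only [if_pos hg]
    cases pvSolve r t <;> cases pvSolve r (t + v) <;> simp [omin, Int.min_def]
    all_goals omega
  · simp [if_neg hg, omin_none_right]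

-- replacing the (unique) entry at key k by a smaller value = adding the smaller value
theorem lmin_replace (r : List Int) (L : List (Int × Int)) (k u w : Int)
    (hnd : (L.map Prod.fst).Nodup) (hm : (k, u) ∈ L) (hw : w ≤ u) :
    lmin ((L.map (fun p => if p.1 == k then (k, w) else p)).map (pvTerm r)) =
      omin (lmin (L.map (pvTerm r))) (pvTerm r (k, w)) := by
  induction L with
  | nil => cases hm
  | cons p L ih =>
    simp only [List.map_cons, List.nodup_cons, List.mem_map] at hnd
    rcases List.mem_cons.mp hm with heq | hmt
    · subst heq
      have hLid : L.map (fun p => if p.1 == k then (k, w) else p) = L := by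
        rw [List.map_congr_left (g := id), List.map_id]
        intro q hq
        have hne : q.1 ≠ k := fun h => hnd.1 ⟨q, hq, h⟩
        simp [hne]
      simp only [List.map_cons, hLid, beq_self_eq_true, if_pos]
      rw [lmin_cons, lmin_cons, omin_comm (pvTerm r (k, u)) (lmin (L.map (pvTerm r))),
        omin_assoc, pvTerm_absorb, min_eq_right hw, omin_comm]
    · have hne : p.1 ≠ k := fun h => hnd.1 ⟨(k, u), hmt, by rw [h]⟩
      have hb : (p.1 == k) = false := by simpa using hne
      simp only [List.map_cons, hb, Bool.false_eq_true, if_false]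
      rw [lmin_cons, lmin_cons, ih hnd.2 hmt, omin_assoc]

-- one inner-loop iteration, seen through pvCombine
theorem combine_inner (v : Int) (r : List Int) (f : PySem.Dict Int Int) (hf : f.keys.Nodup)
    (tc : Int × Int) :
    pvCombine (pvInner v f tc) r = omin (pvCombine f r) (pvContrib v r tc) := by
  obtain ⟨t, c⟩ := tc
  have hnd : (f.items.map Prod.fst).Nodup := by
    simpa [PySem.Dict.keys] using hf
  unfold pvInner pvContrib
  by_cases hg : t + v ≤ 42
  · simp only [if_pos hg]
    by_cases hc : f.contains (t + v) = false
    · rw [if_pos (Or.inl hc)]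
      unfold pvCombine
      rw [PySem.Dict.items_insert_of_not_contains f _ hc, List.map_append, lmin_append]
      rfl
    · have hsome : (f.get? (t + v)).isSome := by
        rw [← PySem.Dict.contains_eq_isSome_get?]
        simpa using hc
      obtain ⟨u, hu⟩ := Option.isSome_iff_exists.mp hsome
      have hgetD : f.getD (t + v) 0 = u := PySem.Dict.getD_of_get?_eq_some f 0 hu
      have hmem : (t + v, u) ∈ f.items := PySem.Dict.mem_items_of_get?_eq_some f hu
      by_cases hlt : c + 1 < f.getD (t + v) 0
      · rw [if_pos (Or.inr hlt)]
        unfold pvCombine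
        rw [PySem.Dict.items_insert_of_contains f _ (by simpa using hc)]
        exact lmin_replace r f.items (t + v) u (c + 1) hnd hmem (by omega)
      · rw [if_neg (by tauto)]
        unfold pvCombine
        rw [eq_comm]
        refine lmin_absorb _ (pvTerm r (t + v, u)) _ (List.mem_map.mpr ⟨_, hmem, rfl⟩) ?_
        rw [pvTerm_absorb, min_eq_left (by omega)]
  · simp only [if_neg hg]
    exact (omin_none_right _).symm

theorem keys_nodup_inner (v : Int) (f : PySem.Dict Int Int) (hf : f.keys.Nodup) (tc : Int × Int) :
    (pvInner v f tc).keys.Nodup := by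
  unfold pvInner
  dsimp only
  split_ifs with h1 h2
  · exact PySem.Dict.nodup_keys_insert f _ _ hf
  · exact hf
  · exact hf

theorem keys_nodup_inner_foldl (v : Int) (ps : List (Int × Int)) (f : PySem.Dict Int Int)
    (hf : f.keys.Nodup) : (ps.foldl (pvInner v) f).keys.Nodup := by
  induction ps generalizing f with
  | nil => exact hf
  | cons tc ps ih => exact ih _ (keys_nodup_inner v f hf tc)

theorem combine_inner_foldl (v : Int) (r : List Int) (ps : List (Int × Int))
    (f : PySem.Dict Int Int) (hf : f.keys.Nodup) :
    pvCombine (ps.foldl (pvInner v) f) r = omin (pvCombine f r) (lmin (ps.map (pvContrib v r))) := by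
  induction ps generalizing f with
  | nil => simp [List.foldl, lmin, omin_none_right]
  | cons tc ps ih =>
    simp only [List.foldl_cons, List.map_cons]
    rw [ih _ (keys_nodup_inner v f hf tc), combine_inner v r f hf tc, lmin_cons, omin_assoc]

theorem combine_step (v : Int) (r : List Int) (f : PySem.Dict Int Int) (hf : f.keys.Nodup) :
    pvCombine (pvStepA f v) r = pvCombine f (v :: r) := by
  unfold pvStepA
  rw [combine_inner_foldl v r f.items f hf]
  have : pvCombine f (v :: r) =
      lmin (f.items.map fun tc => omin (pvTerm r tc) (pvContrib v r tc)) := by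
    unfold pvCombine
    congr 1
    exact List.map_congr_left fun tc _ => pvTerm_cons v r tc
  rw [this, lmin_split]
  rfl

theorem get?_eq_lmin_base (L : List (Int × Int)) (hnd : (L.map Prod.fst).Nodup) :
    (PySem.Dict.mk L).get? 42 = lmin (L.map (pvTerm [])) := by
  induction L with
  | nil => rfl
  | cons p L ih =>
    obtain ⟨t, c⟩ := p
    simp only [List.map_cons, List.nodup_cons, List.mem_map] at hnd
    rw [PySem.Dict.get?_mk_cons]
    simp only [List.map_cons]
    rw [lmin_cons]
    by_cases ht : t = 42
    · subst ht
      have htail : lmin (L.map (pvTerm [])) = none := by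
        refine lmin_eq_none _ fun x hx => ?_
        obtain ⟨⟨t', c'⟩, hq, rfl⟩ := List.mem_map.mp hx
        have ht' : t' ≠ 42 := fun h => hnd.1 ⟨(t', c'), hq, h⟩
        simp [pvTerm, pvSolve, ht']
      rw [htail, omin_none_right]
      simp [pvTerm, pvSolve]
    · have : (t == (42 : Int)) = false := by simpa using ht
      rw [this, ih hnd.2]
      have : pvTerm [] (t, c) = none := by simp [pvTerm, pvSolve, ht]
      rw [this]
      rfl

theorem main_invariant (r : List Int) (d : PySem.Dict Int Int) (hd : d.keys.Nodup) :
    (r.foldl pvStepA d).get? 42 = pvCombine d r := by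
  induction r generalizing d with
  | nil =>
    have hnd : (d.items.map Prod.fst).Nodup := by simpa [PySem.Dict.keys] using hd
    exact get?_eq_lmin_base d.items hnd
  | cons v r ih =>
    simp only [List.foldl_cons]
    rw [ih (pvStepA d v) (keys_nodup_inner_foldl v d.items d hd), combine_step v r d hd]

-- ===== VERDICT (by name: the statement is the Claim_ definition above) =====
theorem minimum_components_spec : Claim_equal_minimum_components := by
  intro components _
  unfold Spec_minimum_components minimum_components minimum_components_alt
  have h0 : (PySem.Dict.ofList [((0 : Int), (0 : Int))]).keys.Nodup := by decide
  rw [PySem.Dict.getD_eq_get?_getD, main_invariant components _ h0]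
  have : pvCombine (PySem.Dict.ofList [((0 : Int), (0 : Int))]) components =
      (pvSolve components 0).map (0 + ·) := by
    unfold pvCombine pvTerm
    rfl
  rw [this]
  cases h : pvSolve components 0 <;> simp
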